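-- pv_equiv track=rewrite | github.com/davivc/algorithms | codility/prefix-sums/genomic-range-query.py | solution
-- ===== SOURCE A (Python) =====
-- def solution(S, P, Q):
--     K = min(len(P), len(Q))
--
--     S_arr = [*S]
--
--     sum_arr_a = [0]
--     sum_arr_c = [0]
--     sum_arr_g = [0]
--
--     for i in range(0, len(S_arr)):
--         a = sum_arr_a[i]
--         c = sum_arr_c[i]
--         g = sum_arr_g[i]
--         if S_arr[i] == "A":
--             a += 1
--         elif S_arr[i] == "C":
--             c += 1
--         elif S_arr[i] == "G":
--             g += 1
--
--         sum_arr_a.append(a)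
--         sum_arr_c.append(c)
--         sum_arr_g.append(g)
--
--     answer = []
--     for j in range(K):
--         start = P[j]
--         end = Q[j]+1
--
--         if end > len(sum_arr_a) or start > len(sum_arr_a):
--             continue
--
--         minimal = 4
--         if sum_arr_a[end]-sum_arr_a[start] > 0:
--             minimal = 1
--         elif sum_arr_c[end]-sum_arr_c[start] > 0:
--             minimal = 2
--         elif sum_arr_g[end]-sum_arr_g[start] > 0:
--             minimal = 3
--
--         answer.append(minimal)
--
--     return answer
-- ===== SOURCE B (Python) =====
-- def solution(S, P, Q):
--     n = len(S)
--     answer = []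
--     for s, q in zip(P, Q):
--         e = q + 1
--         if e > n + 1 or s > n + 1:
--             continue
--         best = 4
--         for ch in S[s:e]:
--             v = 1 if ch == 'A' else 2 if ch == 'C' else 3 if ch == 'G' else 4
--             if v < best:
--                 best = v
--         answer.append(best)
--     return answer
-- ===== Notes on version B (the rewrite author's own statement) =====
-- stated objective: simpler
-- what changed: Dropped the three precomputed prefix-sum arrays and answers each query by directly rescanning the slice S[P[j]:Q[j]+1] for the minimum impact factor, keeping A's skip guard for out-of-range queries.
-- outside the precondition, e.g. on solution('AC', [-2], [0]): A returns [4], B returns [1]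
import Mathlib
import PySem

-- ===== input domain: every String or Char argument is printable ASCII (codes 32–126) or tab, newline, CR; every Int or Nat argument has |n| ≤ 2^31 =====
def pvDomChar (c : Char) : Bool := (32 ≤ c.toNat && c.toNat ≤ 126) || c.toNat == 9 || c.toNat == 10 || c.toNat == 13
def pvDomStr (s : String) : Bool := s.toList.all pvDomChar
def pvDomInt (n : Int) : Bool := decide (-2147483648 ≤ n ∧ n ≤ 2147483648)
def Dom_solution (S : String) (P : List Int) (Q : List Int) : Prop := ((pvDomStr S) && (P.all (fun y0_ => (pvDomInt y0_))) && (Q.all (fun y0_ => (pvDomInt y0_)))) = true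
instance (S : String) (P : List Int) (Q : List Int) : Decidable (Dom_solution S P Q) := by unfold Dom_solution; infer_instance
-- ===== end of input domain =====

-- B drops A's three precomputed prefix-sum arrays and answers each query by rescanning the slice directly (simpler; return value only, no mutation).

-- ===== PORT A =====
-- A-side helper: the body of A's first loop (one step of building the three prefix-sum lists)
def pvStepA (l : List Char) (st : List Int × List Int × List Int) (i : Nat) :
    List Int × List Int × List Int :=
  let a := st.1.getD i 0        -- sum_arr_a[i] (i is in range)
  let c := st.2.1.getD i 0
  let g := st.2.2.getD i 0
  let ch := l.getD i ' '        -- S_arr[i] (i is in range)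
  let acg :=
    if ch = 'A' then (a + 1, c, g)
    else if ch = 'C' then (a, c + 1, g)
    else if ch = 'G' then (a, c, g + 1)
    else (a, c, g)
  (st.1 ++ [acg.1], st.2.1 ++ [acg.2.1], st.2.2 ++ [acg.2.2])

-- literal transliteration of A: build the prefix-sum lists, then answer each query by prefix differences
def solution (S : String) (P : List Int) (Q : List Int) : List Int :=
  let K := min P.length Q.length
  let Sarr := S.toList
  let st := (List.range Sarr.length).foldl (pvStepA Sarr) ([0], [0], [0])
  (List.range K).foldl
    (fun answer j =>
      let start := P.getD j 0         -- P[j] (j < len P)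
      let end_ := Q.getD j 0 + 1
      if end_ > (st.1.length : Int) ∨ start > (st.1.length : Int) then answer
      else
        -- sum_arr[x]: Python list indexing; IndexError (pyGet? = none) is excluded by Pre_, default 0
        if PySem.List.pyGetD st.1 end_ 0 - PySem.List.pyGetD st.1 start 0 > 0 then answer ++ [1]
        else if PySem.List.pyGetD st.2.1 end_ 0 - PySem.List.pyGetD st.2.1 start 0 > 0 then answer ++ [2]
        else if PySem.List.pyGetD st.2.2 end_ 0 - PySem.List.pyGetD st.2.2 start 0 > 0 then answer ++ [3]
        else answer ++ [4])
    []

-- ===== PORT B =====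
-- B-side helper: 1 if ch == 'A' else 2 if ch == 'C' else 3 if ch == 'G' else 4
def pvImpact (ch : Char) : Int :=
  if ch = 'A' then 1 else if ch = 'C' then 2 else if ch = 'G' then 3 else 4

-- literal transliteration of B: per-query rescan of the slice S[s:e], keeping a running minimum
def solution_alt (S : String) (P : List Int) (Q : List Int) : List Int :=
  let n := (S.toList.length : Int)
  (List.zip P Q).foldl
    (fun answer sq =>
      let s := sq.1
      let e := sq.2 + 1
      if e > n + 1 ∨ s > n + 1 then answer
      else
        answer ++ [(PySem.List.slice S.toList (some s) (some e)).foldl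
            (fun best ch => if pvImpact ch < best then pvImpact ch else best) 4])
    []

-- ===== PRECONDITION & SPEC =====
-- Pre_ restricts each non-skipped query to the problem's natural domain 0 ≤ P[j], 0 ≤ Q[j]+1 ≤ |S|:
-- outside it A raises IndexError (e.g. Q[j] = |S|) or returns a value only via Python
-- negative-index wraparound into the prefix arrays, outside the task's natural domain.
def Pre_solution (S : String) (P : List Int) (Q : List Int) : Prop :=
  ∀ j : Nat, j < min P.length Q.length →
    (Q.getD j 0 + 1 > (S.toList.length : Int) + 1 ∨ P.getD j 0 > (S.toList.length : Int) + 1) ∨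
    (0 ≤ P.getD j 0 ∧ 0 ≤ Q.getD j 0 + 1 ∧
     P.getD j 0 ≤ (S.toList.length : Int) ∧ Q.getD j 0 + 1 ≤ (S.toList.length : Int))
instance (S : String) (P : List Int) (Q : List Int) : Decidable (Pre_solution S P Q) := by
  unfold Pre_solution; infer_instance

def pvWitness_solution : String × List Int × List Int := ("GACACCATA", [0, 0, 4, 7], [2, 8, 5, 100])

def Spec_solution (S : String) (P : List Int) (Q : List Int) (out : List Int) : Prop := out = solution_alt S P Q
instance (S : String) (P : List Int) (Q : List Int) (out : List Int) : Decidable (Spec_solution S P Q out) := by unfold Spec_solution; infer_instance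

-- ===== CLAIM (what is proved, stated in full; the proofs are below) =====
def Claim_equal_solution : Prop := ∀ (S : String) (P : List Int) (Q : List Int), Dom_solution S P Q → Pre_solution S P Q → Spec_solution S P Q (solution S P Q)

-- ===== LEMMAS AND PROOFS =====

-- prefix-count lists: what A's first loop builds
def pvPref (l : List Char) (c : Char) (m : Nat) : List Int :=
  (List.range (m + 1)).map (fun i => ((l.take i).count c : Int))

-- the minimum impact of a list of nucleotides, as a membership case split
def pvW (xs : List Char) : Int :=
  if 'A' ∈ xs then 1 else if 'C' ∈ xs then 2 else if 'G' ∈ xs then 3 else 4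

theorem pvW_bounds (xs : List Char) : 1 ≤ pvW xs ∧ pvW xs ≤ 4 := by
  unfold pvW; split_ifs <;> norm_num

theorem pvW_cons (x : Char) (xs : List Char) : pvW (x :: xs) = min (pvImpact x) (pvW xs) := by
  by_cases hA : x = 'A' <;> by_cases hC : x = 'C' <;> by_cases hG : x = 'G' <;>
  by_cases mA : 'A' ∈ xs <;> by_cases mC : 'C' ∈ xs <;> by_cases mG : 'G' ∈ xs <;>
    simp_all [pvW, pvImpact, List.mem_cons, eq_comm]

theorem pvBestFold_aux (xs : List Char) (acc : Int) (hacc : acc ≤ 4) :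
    xs.foldl (fun best ch => if pvImpact ch < best then pvImpact ch else best) acc
      = min acc (pvW xs) := by
  induction xs generalizing acc with
  | nil => simp [pvW]; omega
  | cons x xs ih =>
    simp only [List.foldl_cons]
    have hb : 1 ≤ pvImpact x ∧ pvImpact x ≤ 4 := by unfold pvImpact; split_ifs <;> norm_num
    have hle : (if pvImpact x < acc then pvImpact x else acc) ≤ 4 := by split_ifs <;> omega
    rw [ih _ hle, pvW_cons]
    have hw := pvW_bounds xs
    rw [min_def, min_def, min_def]; split_ifs <;> omega

theorem pvBestFold (xs : List Char) :
    xs.foldl (fun best ch => if pvImpact ch < best then pvImpact ch else best) 4 = pvW xs := by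
  have := pvW_bounds xs
  rw [pvBestFold_aux xs 4 (by norm_num), min_def]; split_ifs <;> omega

theorem pvDiffPos (l : List Char) (c : Char) (s' e' : Nat) :
    (0 < ((l.take e').count c : Int) - ((l.take s').count c)) ↔
      c ∈ (l.drop s').take (e' - s') := by
  by_cases h : e' ≤ s'
  · have h0 : e' - s' = 0 := by omega
    have hsub : (l.take e').count c ≤ (l.take s').count c := by
      have ht : l.take e' = (l.take s').take e' := by rw [List.take_take]; congr 1; omega
      rw [ht]; exact List.Sublist.count_le c (List.take_sublist _ _)
    simp [h0]; omega
  · have hsum : s' + (e' - s') = e' := by omega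
    have hsplit : l.take e' = l.take s' ++ (l.drop s').take (e' - s') := by
      conv_lhs => rw [← hsum, List.take_add]
    rw [hsplit, List.count_append]
    rw [show (0:Int) < ((l.take s').count c + ((l.drop s').take (e'-s')).count c : Nat) - ((l.take s').count c : Nat) ↔ 0 < (((l.drop s').take (e'-s')).count c : Int) by push_cast; omega]
    simp [List.count_pos_iff]

theorem pvPref_length (l : List Char) (c : Char) (m : Nat) : (pvPref l c m).length = m + 1 := by
  simp [pvPref]

theorem pvPref_pyGetD (l : List Char) (c : Char) (m : Nat) (x : Int)
    (h0 : 0 ≤ x) (h1 : x ≤ (m : Int)) :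
    PySem.List.pyGetD (pvPref l c m) x 0 = ((l.take x.toNat).count c : Int) := by
  rw [PySem.List.pyGetD_eq_getElem _ _ h0 (by rw [pvPref_length]; push_cast; omega)]
  simp [pvPref]

-- one query: A's prefix-difference chain equals B's rescan of the slice
theorem pvQuery (l : List Char) (s e : Int) (hs0 : 0 ≤ s) (he0 : 0 ≤ e) :
    (if 0 < ((l.take e.toNat).count 'A' : Int) - ((l.take s.toNat).count 'A') then (1:Int)
     else if 0 < ((l.take e.toNat).count 'C' : Int) - ((l.take s.toNat).count 'C') then 2
     else if 0 < ((l.take e.toNat).count 'G' : Int) - ((l.take s.toNat).count 'G') then 3 else 4)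
    = (PySem.List.slice l (some s) (some e)).foldl
        (fun best ch => if pvImpact ch < best then pvImpact ch else best) 4 := by
  rw [PySem.List.slice_toNat l hs0 he0, pvBestFold]
  simp only [pvDiffPos, pvW]

-- the invariant of A's first loop
theorem pvBuild (l : List Char) (m : Nat) (hm : m ≤ l.length) :
    (List.range m).foldl (pvStepA l) ([0], [0], [0])
      = (pvPref l 'A' m, pvPref l 'C' m, pvPref l 'G' m) := by
  induction m with
  | zero => simp [pvPref]
  | succ m ih =>
    have hm' : m ≤ l.length := by omega
    rw [List.range_succ, List.foldl_append, ih hm']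
    simp only [List.foldl_cons, List.foldl_nil]
    have hgd : ∀ c : Char, (pvPref l c m).getD m 0 = ((l.take m).count c : Int) := by
      intro c
      rw [List.getD_eq_getElem _ _ (by rw [pvPref_length]; omega)]
      simp [pvPref]
    have hch : l.getD m ' ' = l[m]'(by omega) := List.getD_eq_getElem _ _ (by omega)
    have happ : ∀ c : Char, pvPref l c (m+1) = pvPref l c m ++ [((l.take (m+1)).count c : Int)] := by
      intro c; simp [pvPref, List.range_succ]
    have hcnt : ∀ c : Char, ((l.take (m+1)).count c : Int)
        = ((l.take m).count c : Int) + (if l[m]'(by omega) = c then 1 else 0) := by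
      intro c
      rw [List.take_add_one, List.count_append,
        List.getElem?_eq_getElem (show m < l.length by omega)]
      simp only [Option.toList_some, List.count_cons, List.count_nil, beq_iff_eq]
      push_cast
      split_ifs <;> simp_all
    unfold pvStepA
    simp only [hgd, hch]
    rw [happ 'A', happ 'C', happ 'G']
    simp only [hcnt]
    by_cases h1 : l[m]'(by omega) = 'A' <;> by_cases h2 : l[m]'(by omega) = 'C' <;>
      by_cases h3 : l[m]'(by omega) = 'G' <;> simp_all

-- zip P Q, indexed
theorem pvZip (P Q : List Int) :
    List.zip P Q = (List.range (min P.length Q.length)).map (fun j => (P.getD j 0, Q.getD j 0)) := by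
  apply List.ext_getElem
  · simp
  · intro i h1 h2
    have hi : i < min P.length Q.length := by simpa using h1
    simp only [List.getElem_zip, List.getElem_map, List.getElem_range]
    rw [List.getD_eq_getElem _ _ (by omega), List.getD_eq_getElem _ _ (by omega)]

theorem pvMain (S : String) (P : List Int) (Q : List Int) (hPre : Pre_solution S P Q) :
    solution S P Q = solution_alt S P Q := by
  unfold solution solution_alt
  dsimp only
  rw [pvBuild S.toList S.toList.length le_rfl, pvZip P Q, List.foldl_map]
  apply PySem.List.foldl_congr_mem
  intro acc j hj
  rw [List.mem_range] at hj
  have hp := hPre j hj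
  dsimp only
  rw [pvPref_length]
  have hcast : ((S.toList.length + 1 : Nat) : Int) = (S.toList.length : Int) + 1 := by push_cast; ring
  rw [hcast]
  by_cases hg : Q.getD j 0 + 1 > (S.toList.length : Int) + 1 ∨ P.getD j 0 > (S.toList.length : Int) + 1
  · rw [if_pos hg, if_pos hg]
  · rw [if_neg hg, if_neg hg]
    have hb : 0 ≤ P.getD j 0 ∧ 0 ≤ Q.getD j 0 + 1 ∧
        P.getD j 0 ≤ (S.toList.length : Int) ∧ Q.getD j 0 + 1 ≤ (S.toList.length : Int) := by
      rcases hp with h | h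
      · exact absurd h hg
      · exact h
    obtain ⟨hs0, he0, hsn, hen⟩ := hb
    rw [pvPref_pyGetD _ 'A' _ _ he0 hen, pvPref_pyGetD _ 'A' _ _ hs0 hsn,
        pvPref_pyGetD _ 'C' _ _ he0 hen, pvPref_pyGetD _ 'C' _ _ hs0 hsn,
        pvPref_pyGetD _ 'G' _ _ he0 hen, pvPref_pyGetD _ 'G' _ _ hs0 hsn]
    have hq := pvQuery S.toList (P.getD j 0) (Q.getD j 0 + 1) hs0 he0
    rw [← hq]
    split_ifs <;> rfl

-- ===== VERDICT (by name: the statement is the Claim_ definition above) =====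
theorem solution_spec : Claim_equal_solution := by
  intro S P Q _ hPre
  exact pvMain S P Q hPre
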